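-- pv_equiv track=rewrite | github.com/LaiPe/crypto-rsa | programmes/exo3.py | alphatonum
-- ===== SOURCE A (Python) =====
-- def alphatonum(mot,alpha):
--     li=[] #liste de chiffres par bloc de 3
--     temp="" #mémoire temporaire
--     c=0 #état
--     for i in range(len(mot)): #0 <= i < len(mot)
--         y=0 #position de la i-ème lettre du mot dans alpha (alphabet)
--         while mot[i]!=alpha[y]: #tant que la i-ème lettre ne correspond pas à une lettre de l'alphabet
--             y+=1 #y est incrémenté
--
--         y=str(y)
--         if len(y)==1: # si y est un chiffre (0,1,2,...,9)
--             y="0"+y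
--
--         if c==0: #état 0 (mémoire temp vide)
--             temp=y
--             c+=1 #passage à l'état 1
--         elif c==1: #état 1 (mémoire temp: 2 chiffres)
--             li+=[temp+y[0]]
--             temp=y[1]
--             c+=1 #passage à l'état 2
--         elif c==2: #état 2 (mémoire temp: 1 chiffre)
--             li+=[temp+y]
--             temp=""
--             c=0 #retour à l'état 0
--     if temp!="": #si la mémoire temp n'est pas vide
--         li+=[temp] #flush
--     return li #renvoie li
-- ===== SOURCE B (Python) =====
-- def alphatonum(mot, alpha):
--     # Phase 1: convert each letter to its (zero-padded) index code.
--     codes = []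
--     for ch in mot:
--         y = 0
--         while ch != alpha[y]:
--             y += 1
--         code = str(y)
--         if len(code) == 1:
--             code = "0" + code
--         codes.append(code)
--     # Phase 2: regroup the codes three at a time into the output blocks.
--     blocks = []
--     for k in range(0, len(codes), 3):
--         grp = codes[k:k + 3]
--         if len(grp) == 3:
--             a, b, c = grp
--             blocks += [a + b[0], b[1] + c]
--         elif len(grp) == 2:
--             a, b = grp
--             blocks += [a + b[0], b[1]]
--         else:
--             blocks += grp
--     return blocks
-- ===== Notes on version B (the rewrite author's own statement) =====
-- stated objective: simpler
-- what changed: Replaced the streaming 3-state machine (li/temp/c) by a two-phase computation: first build the list of zero-padded index codes, then regroup them three at a time with a fixed per-triple formula.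
import Mathlib
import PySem

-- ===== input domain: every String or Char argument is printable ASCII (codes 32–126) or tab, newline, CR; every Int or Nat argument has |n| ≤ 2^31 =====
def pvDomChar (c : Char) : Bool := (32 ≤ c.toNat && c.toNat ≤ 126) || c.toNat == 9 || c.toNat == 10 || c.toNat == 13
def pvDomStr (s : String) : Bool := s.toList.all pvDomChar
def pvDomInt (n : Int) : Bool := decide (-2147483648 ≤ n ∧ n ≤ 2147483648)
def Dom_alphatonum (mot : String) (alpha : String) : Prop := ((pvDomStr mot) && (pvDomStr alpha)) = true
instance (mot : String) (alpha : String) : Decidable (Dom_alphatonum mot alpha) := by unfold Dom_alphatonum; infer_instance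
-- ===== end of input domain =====

-- B replaces A's streaming 3-state machine by a two-phase computation (code list, then
-- regroup by triples); objective: simpler. Equal return values on Pre_ (every letter of
-- mot occurs in alpha; otherwise both Pythons raise IndexError).

-- ===== PORT A =====
-- the inner 'while mot[i]!=alpha[y]: y+=1': first index of ch in alpha (none = IndexError)
def pvScan (ch : Char) : List Char → Option Nat
  | [] => none
  | a :: rest => if ch = a then some 0 else (pvScan ch rest).map (· + 1)

-- 'y=str(y); if len(y)==1: y="0"+y'
def pvCode (y : Nat) : List Char :=
  let ys := PySem.Int.toChars (Int.ofNat y)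
  if ys.length = 1 then '0' :: ys else ys

-- the for-loop of A with its state (li, temp, c); on a failed scan Python raises (excluded by Pre_)
def pvAgo (alphaL : List Char) : List Char → List String → List Char → Int → List String
  | [], li, temp, _ => if temp ≠ [] then li ++ [String.ofList temp] else li
  | ch :: rest, li, temp, c =>
    match pvScan ch alphaL with
    | none => li
    | some y =>
      let ys := pvCode y
      if c = 0 then pvAgo alphaL rest li ys (c + 1)
      else if c = 1 then
        pvAgo alphaL rest (li ++ [String.ofList (temp ++ [ys.headD '?'])]) [ys.getD 1 '?'] (c + 1)
      else pvAgo alphaL rest (li ++ [String.ofList (temp ++ ys)]) [] 0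

def alphatonum (mot : String) (alpha : String) : List String :=
  pvAgo alpha.toList mot.toList [] [] 0

-- ===== PORT B =====
-- Phase 1 of B: the list of codes (none = some letter missing, Python B raises IndexError)
def pvCodes (alphaL : List Char) : List Char → Option (List (List Char))
  | [] => some []
  | ch :: rest =>
    match pvScan ch alphaL with
    | none => none
    | some y => (pvCodes alphaL rest).map (pvCode y :: ·)

-- Phase 2 of B: regroup the codes three at a time
def pvChunk3 : List (List Char) → List String
  | [] => []
  | [a] => [String.ofList a]
  | [a, b] => [String.ofList (a ++ [b.headD '?']), String.ofList [b.getD 1 '?']]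
  | a :: b :: c :: rest =>
      String.ofList (a ++ [b.headD '?']) :: String.ofList (b.getD 1 '?' :: c) :: pvChunk3 rest

def alphatonum_alt (mot : String) (alpha : String) : List String :=
  match pvCodes alpha.toList mot.toList with
  | none => []
  | some cs => pvChunk3 cs

-- ===== PRECONDITION & SPEC =====
-- Pre_: every letter of mot occurs in alpha; otherwise the Python A raises IndexError.
def Pre_alphatonum (mot : String) (alpha : String) : Prop :=
  (mot.toList.all (fun ch => alpha.toList.contains ch)) = true
instance (mot : String) (alpha : String) : Decidable (Pre_alphatonum mot alpha) := by
  unfold Pre_alphatonum; infer_instance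

def pvWitness_alphatonum : String × String := ("cab", "abcde")

def Spec_alphatonum (mot : String) (alpha : String) (out : List String) : Prop := out = alphatonum_alt mot alpha
instance (mot : String) (alpha : String) (out : List String) : Decidable (Spec_alphatonum mot alpha out) := by unfold Spec_alphatonum; infer_instance

-- ===== CLAIM (what is proved, stated in full; the proofs are below) =====
def Claim_equal_alphatonum : Prop := ∀ (mot : String) (alpha : String), Dom_alphatonum mot alpha → Pre_alphatonum mot alpha → Spec_alphatonum mot alpha (alphatonum mot alpha)

-- ===== LEMMAS AND PROOFS =====

lemma pvScan_isSome {ch : Char} {l : List Char} (h : ch ∈ l) : (pvScan ch l).isSome := by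
  induction l with
  | nil => cases h
  | cons a rest ih =>
    simp only [pvScan]
    by_cases hc : ch = a
    · simp [hc]
    · simp only [if_neg hc, Option.isSome_map]
      rcases List.mem_cons.1 h with h | h
      · exact absurd h hc
      · exact ih h

lemma pvCodes_isSome {alphaL : List Char} {mot : List Char}
    (h : ∀ ch ∈ mot, ch ∈ alphaL) : (pvCodes alphaL mot).isSome := by
  induction mot with
  | nil => simp [pvCodes]
  | cons ch rest ih =>
    have hs := pvScan_isSome (h ch (List.mem_cons_self ..))
    simp only [pvCodes]
    cases hy : pvScan ch alphaL with
    | none => rw [hy] at hs; simp at hs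
    | some y =>
      simp only [Option.isSome_map]
      exact ih (fun c hc => h c (List.mem_cons_of_mem _ hc))

lemma pvToDigitsCore_len_lt (b f n : Nat) (acc : List Char) :
    acc.length < (Nat.toDigitsCore b (f + 1) n acc).length := by
  induction f generalizing n acc with
  | zero =>
    show acc.length < (if n / b = 0 then Nat.digitChar (n % b) :: acc
      else Nat.toDigitsCore b 0 (n / b) (Nat.digitChar (n % b) :: acc)).length
    split <;> simp [Nat.toDigitsCore]
  | succ f ih =>
    show acc.length < (if n / b = 0 then Nat.digitChar (n % b) :: acc
      else Nat.toDigitsCore b (f + 1) (n / b) (Nat.digitChar (n % b) :: acc)).length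
    split
    · simp
    · calc acc.length < (Nat.digitChar (n % b) :: acc).length := by simp
        _ < _ := ih _ _

lemma pvToChars_ne_nil (y : Nat) : PySem.Int.toChars (Int.ofNat y) ≠ [] := by
  unfold PySem.Int.toChars
  rw [if_neg (by exact not_lt.2 (Int.natCast_nonneg y))]
  show Nat.toDigits 10 _ ≠ []
  unfold Nat.toDigits
  intro hnil
  have := pvToDigitsCore_len_lt 10 (Int.ofNat y).toNat (Int.ofNat y).toNat []
  rw [hnil] at this
  simp at this

lemma pvCode_ne_nil (y : Nat) : pvCode y ≠ [] := by
  show (if (PySem.Int.toChars (Int.ofNat y)).length = 1 then '0' :: PySem.Int.toChars (Int.ofNat y)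
    else PySem.Int.toChars (Int.ofNat y)) ≠ []
  split
  · simp
  · exact pvToChars_ne_nil y

-- Bridge: A's state machine starting from state 0 equals B's triple regrouping of the code list.
lemma pvAgo_eq_chunk3 (alphaL : List Char) :
    ∀ n (mot : List Char), mot.length ≤ n → ∀ cs li,
      pvCodes alphaL mot = some cs → pvAgo alphaL mot li [] 0 = li ++ pvChunk3 cs := by
  intro n
  induction n with
  | zero =>
    intro mot hn cs li hcs
    have : mot = [] := List.eq_nil_of_length_eq_zero (Nat.le_zero.1 hn)
    subst this
    simp only [pvCodes, Option.some.injEq] at hcs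
    subst hcs
    simp [pvAgo, pvChunk3]
  | succ n ih =>
    intro mot hn cs li hcs
    match mot with
    | [] =>
      simp only [pvCodes, Option.some.injEq] at hcs
      subst hcs; simp [pvAgo, pvChunk3]
    | [ch] =>
      simp only [pvCodes] at hcs
      cases hy : pvScan ch alphaL with
      | none => rw [hy] at hcs; simp at hcs
      | some y =>
        rw [hy] at hcs
        simp only [Option.map_some, Option.some.injEq] at hcs
        subst hcs
        simp [pvAgo, hy, pvChunk3, pvCode_ne_nil y]
    | [ch1, ch2] =>
      simp only [pvCodes] at hcs
      cases hy1 : pvScan ch1 alphaL with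
      | none => rw [hy1] at hcs; simp at hcs
      | some y1 =>
        rw [hy1] at hcs
        cases hy2 : pvScan ch2 alphaL with
        | none => rw [hy2] at hcs; simp at hcs
        | some y2 =>
          rw [hy2] at hcs
          simp only [Option.map_some, Option.some.injEq] at hcs
          subst hcs
          simp [pvAgo, hy1, hy2, pvChunk3]
    | ch1 :: ch2 :: ch3 :: rest =>
      simp only [pvCodes] at hcs
      cases hy1 : pvScan ch1 alphaL with
      | none => rw [hy1] at hcs; simp at hcs
      | some y1 =>
        rw [hy1] at hcs
        cases hy2 : pvScan ch2 alphaL with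
        | none => rw [hy2] at hcs; simp at hcs
        | some y2 =>
          rw [hy2] at hcs
          cases hy3 : pvScan ch3 alphaL with
          | none => rw [hy3] at hcs; simp at hcs
          | some y3 =>
            rw [hy3] at hcs
            cases hrest : pvCodes alphaL rest with
            | none => rw [hrest] at hcs; simp at hcs
            | some cs3 =>
              rw [hrest] at hcs
              simp only [Option.map_some, Option.some.injEq] at hcs
              subst hcs
              have hlen : rest.length ≤ n := by
                simp only [List.length_cons] at hn; omega
              simp only [pvAgo, hy1, hy2, hy3]
              norm_num
              rw [ih rest hlen cs3 _ hrest]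
              simp [pvChunk3]

-- ===== VERDICT (by name: the statement is the Claim_ definition above) =====
theorem alphatonum_spec : Claim_equal_alphatonum := by
  intro mot alpha _ hpre
  unfold Spec_alphatonum alphatonum alphatonum_alt
  have hpre' : ∀ ch ∈ mot.toList, ch ∈ alpha.toList := by
    simpa [Pre_alphatonum, List.all_eq_true] using hpre
  have h := pvCodes_isSome (alphaL := alpha.toList) (mot := mot.toList) hpre'
  cases hcs : pvCodes alpha.toList mot.toList with
  | none => rw [hcs] at h; simp at h
  | some cs =>
    rw [pvAgo_eq_chunk3 alpha.toList mot.toList.length mot.toList le_rfl cs [] hcs]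
    simp
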